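-- pv_equiv track=rewrite | github.com/TareHimself/assistant | python/neural/utils.py | replace_at_depth
-- ===== SOURCE A (Python) =====
-- def replace_at_depth(current_value, cur_depth, variations):
--     if cur_depth < len(variations):
--         converted = []
--         for variation in variations[cur_depth]:
--             replaced_current = current_value.replace(f"${cur_depth}", variation.strip())
--             converted.extend(
--                 replace_at_depth(replaced_current, cur_depth + 1, variations)
--             )
--         return converted
--     else:
--         return [current_value]
-- ===== SOURCE B (Python) =====
-- from itertools import product
--
--
-- def replace_at_depth(current_value, cur_depth, variations):
--     depths = range(cur_depth, len(variations))
--     choices = [variations[d] for d in depths]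
--     result = []
--     for combo in product(*choices):
--         value = current_value
--         for d, v in zip(depths, combo):
--             value = value.replace(f"${d}", v.strip())
--         result.append(value)
--     return result
-- ===== Notes on version B (the rewrite author's own statement) =====
-- stated objective: alternative
-- what changed: Replaces A's branching recursion with an iterative Cartesian product (itertools.product over the tail of variation lists) followed by a left fold of per-depth replacements over each choice tuple.
import Mathlib
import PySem

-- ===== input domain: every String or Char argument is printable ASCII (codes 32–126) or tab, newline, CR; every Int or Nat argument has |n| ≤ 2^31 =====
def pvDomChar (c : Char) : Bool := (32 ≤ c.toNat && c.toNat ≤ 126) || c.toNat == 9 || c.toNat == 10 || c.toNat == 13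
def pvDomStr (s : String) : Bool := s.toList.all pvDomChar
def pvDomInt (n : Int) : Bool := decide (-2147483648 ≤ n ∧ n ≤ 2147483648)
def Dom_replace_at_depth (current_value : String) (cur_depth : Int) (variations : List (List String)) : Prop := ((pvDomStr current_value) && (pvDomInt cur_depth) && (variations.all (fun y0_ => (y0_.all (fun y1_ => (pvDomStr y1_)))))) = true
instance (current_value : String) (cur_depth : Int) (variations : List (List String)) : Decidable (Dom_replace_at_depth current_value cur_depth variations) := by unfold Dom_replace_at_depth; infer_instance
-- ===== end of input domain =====

-- B replaces A's branching recursion by an iterative Cartesian product of the variation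
-- lists, applying the per-depth replacements by a left fold over each choice tuple
-- (same cost; a genuinely different decomposition).

-- ===== PORT A =====
def replace_at_depth (current_value : String) (cur_depth : Int) (variations : List (List String)) : List String :=
  if _h : cur_depth < (variations.length : Int) then
    match PySem.List.pyGet? variations cur_depth with
    | none => []   -- Python raises IndexError here; excluded by Pre_
    | some vs =>
      vs.foldl (fun converted variation =>
        converted ++ replace_at_depth
          (PySem.Str.replace current_value ("$" ++ PySem.Int.toStr cur_depth) (PySem.Str.strip variation))
          (cur_depth + 1) variations) []
  else [current_value]
termination_by ((variations.length : Int) - cur_depth).toNat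
decreasing_by omega

-- ===== PORT B =====
-- itertools.product(*choices) in the recursion-free order: first list outermost
def pvProduct : List (List String) → List (List String)
  | [] => [[]]
  | xs :: rest => xs.flatMap (fun x => (pvProduct rest).map (fun t => x :: t))

def replace_at_depth_alt (current_value : String) (cur_depth : Int) (variations : List (List String)) : List String :=
  let depths := PySem.List.pyRange cur_depth (variations.length : Int) 1
  let choices := depths.map (fun d => (PySem.List.pyGet? variations d).getD [])  -- none = Python IndexError, excluded by Pre_
  (pvProduct choices).map (fun combo =>
    (depths.zip combo).foldl
      (fun value dv => PySem.Str.replace value ("$" ++ PySem.Int.toStr dv.1) (PySem.Str.strip dv.2))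
      current_value)

-- ===== PRECONDITION & SPEC =====
-- Pre_ excludes exactly the inputs with cur_depth < -len(variations), where A (and B) raise IndexError.
def Pre_replace_at_depth (current_value : String) (cur_depth : Int) (variations : List (List String)) : Prop :=
  -(variations.length : Int) ≤ cur_depth
instance (current_value : String) (cur_depth : Int) (variations : List (List String)) : Decidable (Pre_replace_at_depth current_value cur_depth variations) := by unfold Pre_replace_at_depth; infer_instance

def pvWitness_replace_at_depth : String × Int × List (List String) := ("a $0 and $1", 0, [[" x ", "y"], ["z"]])

def Spec_replace_at_depth (current_value : String) (cur_depth : Int) (variations : List (List String)) (out : List String) : Prop := out = replace_at_depth_alt current_value cur_depth variations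
instance (current_value : String) (cur_depth : Int) (variations : List (List String)) (out : List String) : Decidable (Spec_replace_at_depth current_value cur_depth variations out) := by unfold Spec_replace_at_depth; infer_instance

-- ===== CLAIM (what is proved, stated in full; the proofs are below) =====
def Claim_equal_replace_at_depth : Prop := ∀ (current_value : String) (cur_depth : Int) (variations : List (List String)), Dom_replace_at_depth current_value cur_depth variations → Pre_replace_at_depth current_value cur_depth variations → Spec_replace_at_depth current_value cur_depth variations (replace_at_depth current_value cur_depth variations)

-- ===== LEMMAS AND PROOFS =====

lemma replace_at_depth_agree (variations : List (List String)) :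
    ∀ (n : Nat) (cur_depth : Int) (current_value : String),
      -(variations.length : Int) ≤ cur_depth →
      ((variations.length : Int) - cur_depth).toNat = n →
      replace_at_depth current_value cur_depth variations
        = replace_at_depth_alt current_value cur_depth variations := by
  intro n
  induction n with
  | zero =>
    intro cur_depth current_value _hlo hn
    have hge : (variations.length : Int) ≤ cur_depth := by omega
    rw [replace_at_depth]
    rw [dif_neg (by omega)]
    simp [replace_at_depth_alt, PySem.List.pyRange_one_eq_nil hge, pvProduct]
  | succ n ih =>
    intro cur_depth current_value hlo hn
    have hlt : cur_depth < (variations.length : Int) := by omega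
    -- variations[cur_depth] is some vs
    obtain ⟨vs, hvs⟩ : ∃ vs, PySem.List.pyGet? variations cur_depth = some vs := by
      rcases h : PySem.List.pyGet? variations cur_depth with _ | vs
      · rw [PySem.List.pyGet?_eq_none_iff] at h
        exact absurd (by constructor <;> omega) h
      · exact ⟨vs, rfl⟩
    -- unfold A
    rw [replace_at_depth, dif_pos hlt, hvs]
    simp only []
    rw [PySem.List.foldl_append_eq_flatMap]
    -- unfold B
    show _ = replace_at_depth_alt current_value cur_depth variations
    unfold replace_at_depth_alt
    rw [PySem.List.pyRange_one_cons hlt]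
    simp only [List.map_cons, hvs, Option.getD_some, pvProduct, List.map_flatMap,
      List.map_map, List.nil_append]
    refine List.flatMap_congr ?_
    intro x _hx
    have hrec := ih (cur_depth + 1)
      (PySem.Str.replace current_value ("$" ++ PySem.Int.toStr cur_depth) (PySem.Str.strip x))
      (by omega) (by omega)
    rw [hrec]
    unfold replace_at_depth_alt
    simp [Function.comp, List.zip_cons_cons, List.foldl_cons]

-- ===== VERDICT (by name: the statement is the Claim_ definition above) =====
theorem replace_at_depth_spec : Claim_equal_replace_at_depth := by
  intro current_value cur_depth variations _hdom hpre
  exact replace_at_depth_agree variations _ cur_depth current_value hpre rfl
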